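-- pv_equiv track=rewrite | github.com/ishakarslan/dns_history | scripts/fqdn_ip.py | first_up
-- ===== SOURCE A (Python) =====
-- def reversed_list(alist):
--     return alist[::-1]
--
-- def first_up(clist, status):
--     if status == "down":
--         for i in reversed_list(clist):
--             if i['ip'] == "0.0.0.0" and i['last_seen'] != "1-1-1":
--                 return i['last_seen']
--                 break
--     elif status == "up":
--         return "1-1-1"
-- ===== SOURCE B (Python) =====
-- def first_up(clist, status):
--     if status == "down":
--         result = None
--         for i in clist:
--             ls = i.get('last_seen')
--             if i.get('ip') == "0.0.0.0" and ls != "1-1-1":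
--                 result = ls
--         return result
--     elif status == "up":
--         return "1-1-1"
-- ===== Notes on version B (the rewrite author's own statement) =====
-- stated objective: simpler
-- what changed: Drops the reversed_list helper and the early-return search over a reversed copy of clist; B scans clist once in its original forward order, overwriting an accumulator on every match (with defensive .get lookups), so the last forward match equals A's first reversed match.
-- crash fix: When status=='down' and the reversed scan reaches a dict missing 'ip' (or with ip=='0.0.0.0' but missing 'last_seen') before any match, A raises KeyError; B's .get lookups return the last forward match (None if there is none) instead. — e.g. on first_up([[("last_seen", "2-2-2")]], "down"): A raises KeyError, B returns none
import Mathlib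
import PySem

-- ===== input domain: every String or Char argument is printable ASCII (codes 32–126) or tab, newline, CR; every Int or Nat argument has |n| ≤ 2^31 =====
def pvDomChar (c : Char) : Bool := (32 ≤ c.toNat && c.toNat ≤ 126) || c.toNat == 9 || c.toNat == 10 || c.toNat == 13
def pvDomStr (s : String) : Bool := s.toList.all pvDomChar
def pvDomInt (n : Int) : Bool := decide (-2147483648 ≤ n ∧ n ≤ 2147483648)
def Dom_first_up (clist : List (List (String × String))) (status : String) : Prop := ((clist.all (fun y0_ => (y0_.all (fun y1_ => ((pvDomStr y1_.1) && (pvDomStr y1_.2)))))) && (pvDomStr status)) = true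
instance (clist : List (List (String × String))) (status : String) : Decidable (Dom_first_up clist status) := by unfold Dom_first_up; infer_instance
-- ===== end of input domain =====

-- ===== PORT A =====
-- B replaces A's reversed-copy + first-match early return with one forward scan keeping
-- the last match in an accumulator (simpler; no speed claim). Return values only; no mutation.

-- helper reversed_list(alist) = alist[::-1]
def reversed_list (alist : List (List (String × String))) : List (List (String × String)) :=
  (PySem.List.slice? alist none none (-1)).getD []

-- A's for-loop over the reversed list: return the first matching last_seen
def first_up_loopA : List (List (String × String)) → Option String
  | [] => none
  | i :: rest =>
      if ((PySem.Dict.mk i).get? "ip" == some "0.0.0.0"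
          && (PySem.Dict.mk i).get? "last_seen" != some "1-1-1") then
        (PySem.Dict.mk i).get? "last_seen"
      else
        first_up_loopA rest

def first_up (clist : List (List (String × String))) (status : String) : Option String :=
  if status == "down" then
    first_up_loopA (reversed_list clist)
  else if status == "up" then
    some "1-1-1"
  else
    none

-- ===== PORT B =====
def first_up_alt (clist : List (List (String × String))) (status : String) : Option String :=
  if status == "down" then
    clist.foldl
      (fun result i =>
        let ls := (PySem.Dict.mk i).get? "last_seen"   -- i.get('last_seen')
        if ((PySem.Dict.mk i).get? "ip" == some "0.0.0.0" && ls != some "1-1-1") then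
          ls
        else
          result)
      none
  else if status == "up" then
    some "1-1-1"
  else
    none

-- ===== PRECONDITION & SPEC =====
-- a dict on which A's condition raises KeyError: 'ip' missing, or ip == '0.0.0.0' with 'last_seen' missing
def pvBad (i : List (String × String)) : Bool :=
  ((PySem.Dict.mk i).get? "ip").isNone
  || ((PySem.Dict.mk i).get? "ip" == some "0.0.0.0" && ((PySem.Dict.mk i).get? "last_seen").isNone)

-- a dict that makes A's condition fire without raising
def pvMatch (i : List (String × String)) : Bool :=
  (PySem.Dict.mk i).get? "ip" == some "0.0.0.0"
  && (match (PySem.Dict.mk i).get? "last_seen" with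
      | some v => v != "1-1-1"
      | none => false)

-- Pre_ excludes exactly the inputs on which Python A raises KeyError: status=='down' and the
-- reversed scan reaches a dict with a missing key before any matching dict — i.e. the last
-- bad-or-matching element of clist (if any) is bad.  A raises there; it returns on all of Pre_.
def Pre_first_up (clist : List (List (String × String))) (status : String) : Prop :=
  status = "down" →
    ((clist.filter (fun i => pvBad i || pvMatch i)).getLast?.all pvMatch) = true
instance (clist : List (List (String × String))) (status : String) : Decidable (Pre_first_up clist status) := by unfold Pre_first_up; infer_instance

def pvWitness_first_up : (List (List (String × String))) × String :=
  ([[("ip", "0.0.0.0"), ("last_seen", "2-2-2")], [("ip", "1.1.1.1"), ("last_seen", "1-1-1")]], "down")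

-- A raises KeyError here (status=='down' and the last bad-or-matching dict is bad); B returns.
def Raises_first_up (clist : List (List (String × String))) (status : String) : Prop :=
  status = "down" ∧
    ((clist.filter (fun i => pvBad i || pvMatch i)).getLast?.any (fun i => !pvMatch i)) = true
instance (clist : List (List (String × String))) (status : String) : Decidable (Raises_first_up clist status) := by unfold Raises_first_up; infer_instance

def pvRaiseWitness_first_up : (List (List (String × String))) × String :=
  ([[("last_seen", "2-2-2")]], "down")
def pvRaiseWitnessOut_first_up : Option String := none

def Spec_first_up (clist : List (List (String × String))) (status : String) (out : Option String) : Prop := out = first_up_alt clist status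
instance (clist : List (List (String × String))) (status : String) (out : Option String) : Decidable (Spec_first_up clist status out) := by unfold Spec_first_up; infer_instance

-- ===== CLAIM (what is proved, stated in full; the proofs are below) =====
def Claim_equal_first_up : Prop := ∀ (clist : List (List (String × String))) (status : String), Dom_first_up clist status → Pre_first_up clist status → Spec_first_up clist status (first_up clist status)
def Claim_raises_first_up : Prop := (∀ (clist : List (List (String × String))) (status : String), Dom_first_up clist status → Raises_first_up clist status → ¬ Pre_first_up clist status) ∧ (Dom_first_up (pvRaiseWitness_first_up.1) (pvRaiseWitness_first_up.2) ∧ Raises_first_up (pvRaiseWitness_first_up.1) (pvRaiseWitness_first_up.2) ∧ first_up_alt (pvRaiseWitness_first_up.1) (pvRaiseWitness_first_up.2) = pvRaiseWitnessOut_first_up)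

-- ===== LEMMAS AND PROOFS =====

-- first match over the reversed list = last match kept by B's forward left fold
theorem first_up_loopA_reverse_eq_foldl (l : List (List (String × String))) :
    first_up_loopA l.reverse =
      l.foldl
        (fun result i =>
          let ls := (PySem.Dict.mk i).get? "last_seen"
          if ((PySem.Dict.mk i).get? "ip" == some "0.0.0.0" && ls != some "1-1-1") then
            ls
          else
            result)
        none := by
  induction l using List.reverseRecOn with
  | nil => rfl
  | append_singleton l a ih =>
      rw [List.reverse_append, List.foldl_append]
      simp only [List.reverse_singleton, List.singleton_append, first_up_loopA, List.foldl_cons,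
        List.foldl_nil]
      split
      · rfl
      · exact ih

-- ===== VERDICT (by name: the statements are the Claim_ definitions above) =====
theorem first_up_spec : Claim_equal_first_up := by
  intro clist status _ _
  unfold Spec_first_up first_up first_up_alt reversed_list
  rw [PySem.List.slice?_none_none_neg_one]
  split
  · exact first_up_loopA_reverse_eq_foldl clist
  · rfl

theorem first_up_raises : Claim_raises_first_up := by
  unfold Claim_raises_first_up
  refine ⟨?_, by decide⟩
  intro clist status _ hr hp
  obtain ⟨hs, hany⟩ := hr
  have hall := hp hs
  cases h : (clist.filter (fun i => pvBad i || pvMatch i)).getLast? with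
  | none => simp [h] at hany
  | some i => simp [h] at hany hall; simp [hall] at hany

-- witness self-check: B's port really returns the stated value at the raise witness (uses first_up_raises)
theorem pvRaiseWitness_ok :
    first_up_alt pvRaiseWitness_first_up.1 pvRaiseWitness_first_up.2 = pvRaiseWitnessOut_first_up :=
  first_up_raises.2.2.2
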